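-- pv_equiv track=rewrite | github.com/sh95fit/CodingTest | 프로그래머스/lv0/120921. 문자열 밀기/문자열 밀기.py | solution
-- ===== SOURCE A (Python) =====
-- def solution(A, B):
--     cnt = 0
--     l = ""
--     for i in range(len(A)) :
--         if A == B :
--             return cnt
--         else :
--             l = A[-1]
--             A = A[:len(A)-1]
--             A= l + A
--             cnt += 1
--     return -1
-- ===== SOURCE B (Python) =====
-- def solution(A, B):
--     # B is a right-rotation of A by k iff A occurs at index k in B+B (same lengths).
--     if len(A) != len(B):
--         return -1
--     return (B + B).find(A)
-- ===== Notes on version B (the rewrite author's own statement) =====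
-- stated objective: faster
-- what changed: Replaces the loop that rebuilds and compares a rotated copy of A up to n times (O(n^2)) with a single substring search of A in the doubled string B+B, whose index is the rotation count.
-- intended difference: On the single input A = B = '' A's loop body never runs and it returns -1, while B returns 0, the intended answer since zero rotations already make the strings equal. — e.g. on solution("", ""): A returns -1, B returns 0
import Mathlib
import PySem

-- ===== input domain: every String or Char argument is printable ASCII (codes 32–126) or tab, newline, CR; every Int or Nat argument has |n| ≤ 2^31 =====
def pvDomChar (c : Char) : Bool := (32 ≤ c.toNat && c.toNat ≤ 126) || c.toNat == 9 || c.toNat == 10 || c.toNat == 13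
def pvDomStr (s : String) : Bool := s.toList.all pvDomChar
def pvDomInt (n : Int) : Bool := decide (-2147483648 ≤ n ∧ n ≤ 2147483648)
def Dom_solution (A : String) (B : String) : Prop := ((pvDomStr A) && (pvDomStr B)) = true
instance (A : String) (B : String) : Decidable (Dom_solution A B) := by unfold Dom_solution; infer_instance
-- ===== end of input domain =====

-- B replaces A's repeated rotate-and-compare loop (O(n^2)) by one substring search of A
-- in the doubled string B+B; the occurrence index is the rotation count (timed faster, asymptotic).

-- ===== PORT A =====
-- the for-loop of A: fuel = range(len(A)); state = (current A, cnt)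
def solutionGo : Nat → List Char → List Char → Int → Int
  | 0, _, _, _ => -1
  | fuel + 1, a, b, cnt =>
    if a = b then cnt
    else
      match PySem.List.pyGet? a (-1) with      -- l = A[-1]
      | none => -1                             -- IndexError: unreachable, a ≠ [] whenever the loop body runs
      | some l =>
        -- A = A[:len(A)-1]; A = l + A; cnt += 1
        solutionGo fuel (l :: PySem.List.slice a none (some ((a.length : Int) - 1))) b (cnt + 1)

def solution (A : String) (B : String) : Int :=
  solutionGo A.toList.length A.toList B.toList 0

-- ===== PORT B =====
def solution_alt (A : String) (B : String) : Int :=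
  if A.toList.length = B.toList.length then
    PySem.Chars.find (B.toList ++ B.toList) A.toList   -- (B + B).find(A)
  else -1

-- ===== PRECONDITION & SPEC =====
-- On the single input A = B = "" A's loop body never runs and it returns -1, while B returns 0,
-- the intended answer since zero rotations already make the strings equal.
def D_solution (A : String) (B : String) : Prop := A.toList = [] ∧ B.toList = []
instance (A : String) (B : String) : Decidable (D_solution A B) := by unfold D_solution; infer_instance

def Spec_solution (A : String) (B : String) (out : Int) : Prop := ¬ D_solution A B → out = solution_alt A B
instance (A : String) (B : String) (out : Int) : Decidable (Spec_solution A B out) := by unfold Spec_solution; infer_instance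

def pvDiffWitness_solution : String × String := ("", "")
def pvDiffWitnessOut_solution : Int × Int := (-1, 0)

-- ===== CLAIM (what is proved, stated in full; the proofs are below) =====
def Claim_unchanged_solution : Prop := ∀ (A : String) (B : String), Dom_solution A B → Spec_solution A B (solution A B)
def Claim_changed_solution : Prop := Dom_solution (pvDiffWitness_solution.1) (pvDiffWitness_solution.2) ∧ D_solution (pvDiffWitness_solution.1) (pvDiffWitness_solution.2) ∧ solution (pvDiffWitness_solution.1) (pvDiffWitness_solution.2) = pvDiffWitnessOut_solution.1 ∧ solution_alt (pvDiffWitness_solution.1) (pvDiffWitness_solution.2) = pvDiffWitnessOut_solution.2 ∧ pvDiffWitnessOut_solution.1 ≠ pvDiffWitnessOut_solution.2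
def Claim_exact_solution : Prop := ∀ (A : String) (B : String), Dom_solution A B → D_solution A B → solution A B ≠ solution_alt A B

-- ===== LEMMAS AND PROOFS =====

-- one step of A's loop: right-rotation by one
def pvRot (a : List Char) : List Char :=
  match a.getLast? with
  | none => []
  | some l => l :: a.dropLast

lemma pvRot_of_ne_nil (a : List Char) (h : a ≠ []) :
    pvRot a = a.getLast h :: a.dropLast := by
  unfold pvRot
  rw [List.getLast?_eq_some_getLast h]

lemma pvRot_length (a : List Char) : (pvRot a).length = a.length := by
  unfold pvRot
  cases ha : a.getLast? with
  | none => simp_all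
  | some l =>
    have hne : a ≠ [] := by rintro rfl; simp at ha
    have : 0 < a.length := List.length_pos_of_ne_nil hne
    simp [List.length_dropLast]
    omega

lemma pvRot_ne_nil (a : List Char) (h : a ≠ []) : pvRot a ≠ [] := by
  have := pvRot_length a
  intro h'
  rw [h'] at this
  exact h (List.eq_nil_of_length_eq_zero this.symm)

lemma pyGet_neg_one (a : List Char) (h : a ≠ []) :
    PySem.List.pyGet? a (-1) = some (a.getLast h) := by
  rw [PySem.List.pyGet?_neg_one, List.getLast?_eq_some_getLast h]

lemma step_eq_pvRot (a : List Char) (h : a ≠ []) :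
    (a.getLast h :: PySem.List.slice a none (some ((a.length : Int) - 1))) = pvRot a := by
  have hpos : 0 < a.length := List.length_pos_of_ne_nil h
  have hs := PySem.List.slice_to a (b := (a.length : Int) - 1) (by omega)
  rw [hs, pvRot_of_ne_nil a h]
  congr 1
  rw [List.dropLast_eq_take]
  congr 1
  omega

lemma pvRot_rotate (a : List Char) (h : a ≠ []) : (pvRot a).rotate 1 = a := by
  rw [pvRot_of_ne_nil a h]
  rw [show (1 : Nat) = 0 + 1 from rfl, List.rotate_cons_succ, List.rotate_zero,
      List.dropLast_append_getLast h]

lemma rotate_pvRot (a : List Char) (h : a ≠ []) : pvRot (a.rotate 1) = a := by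
  cases a with
  | nil => exact absurd rfl h
  | cons c t =>
    rw [show (1 : Nat) = 0 + 1 from rfl, List.rotate_cons_succ, List.rotate_zero]
    unfold pvRot
    rw [List.getLast?_concat, List.dropLast_concat]

lemma iter_length (j : Nat) (a : List Char) : (pvRot^[j] a).length = a.length := by
  induction j with
  | zero => rfl
  | succ j ih => rw [Function.iterate_succ_apply', pvRot_length, ih]

lemma iter_ne_nil (j : Nat) (a : List Char) (h : a ≠ []) : pvRot^[j] a ≠ [] := by
  intro h'
  have := iter_length j a
  rw [h'] at this
  exact h (List.eq_nil_of_length_eq_zero this.symm)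

lemma iter_rotate (j : Nat) (a : List Char) (h : a ≠ []) : (pvRot^[j] a).rotate j = a := by
  induction j with
  | zero => simp
  | succ j ih =>
    rw [Function.iterate_succ_apply', Nat.add_comm j 1, ← List.rotate_rotate,
        pvRot_rotate _ (iter_ne_nil j a h), ih]

lemma rotate_iter (j : Nat) (b : List Char) (h : b ≠ []) : pvRot^[j] (b.rotate j) = b := by
  induction j with
  | zero => simp
  | succ j ih =>
    rw [Function.iterate_succ_apply, show j + 1 = j + 1 from rfl, ← List.rotate_rotate,
        rotate_pvRot _ (by simpa using h), ih]

lemma iter_eq_iff (j : Nat) (a b : List Char) (ha : a ≠ []) :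
    pvRot^[j] a = b ↔ a = b.rotate j := by
  constructor
  · intro h
    have := iter_rotate j a ha
    rw [h] at this
    exact this.symm
  · intro h
    have hb : b ≠ [] := by
      intro hbnil
      rw [hbnil] at h
      simp at h
      exact ha h
    rw [h]
    exact rotate_iter j b hb

lemma prefix_drop_iff (a b : List Char) (h : a.length = b.length) (j : Nat) (hj : j ≤ b.length) :
    a <+: (b ++ b).drop j ↔ a = b.rotate j := by
  rw [List.drop_append_of_le_length hj, List.prefix_iff_eq_take,
      List.take_append, List.take_of_length_le (by simp; omega),
      List.rotate_eq_drop_append_take hj,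
      show a.length - (b.drop j).length = j from by simp [List.length_drop]; omega]

lemma find?_range_some (p : Nat → Bool) :
    ∀ (n m : Nat), m < n → p m = true → (∀ j, j < m → p j = false) →
      (List.range n).find? p = some m := by
  intro n
  induction n with
  | zero => intro m h1 _ _; omega
  | succ n ih =>
    intro m h1 h2 h3
    rw [List.range_succ, List.find?_append]
    by_cases hm : m < n
    · rw [ih m hm h2 h3]
      rfl
    · have hmn : m = n := by omega
      subst hmn
      have hnone : (List.range m).find? p = none :=
        List.find?_eq_none.mpr (fun x hx => by simp [h3 x (List.mem_range.mp hx)])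
      rw [hnone]
      simp [h2]

lemma go_spec (fuel : Nat) (a b : List Char) (cnt : Int) (ha : a ≠ []) :
    solutionGo fuel a b cnt =
      match (List.range fuel).find? (fun j => decide (pvRot^[j] a = b)) with
      | some j => cnt + j
      | none => -1 := by
  induction fuel generalizing a cnt with
  | zero => simp [solutionGo]
  | succ fuel ih =>
    rw [solutionGo]
    by_cases hab : a = b
    · rw [if_pos hab, List.range_succ_eq_map, List.find?_cons_of_pos (by simp [hab])]
      simp
    · rw [if_neg hab, pyGet_neg_one a ha]
      simp only []
      rw [step_eq_pvRot a ha, ih (pvRot a) (cnt + 1) (pvRot_ne_nil a ha)]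
      have hfind : (List.range (fuel + 1)).find? (fun j => decide (pvRot^[j] a = b)) =
          ((List.range fuel).find? (fun j => decide (pvRot^[j] (pvRot a) = b))).map Nat.succ := by
        rw [List.range_succ_eq_map, List.find?_cons_of_neg (by simp [hab]), List.find?_map]
        congr 1
      rw [hfind]
      cases (List.range fuel).find? (fun j => decide (pvRot^[j] (pvRot a) = b)) with
      | none => rfl
      | some j =>
        simp only [Option.map_some]
        push_cast
        ring

lemma go_ne_length (fuel : Nat) (a b : List Char) (cnt : Int) (h : a.length ≠ b.length) :
    solutionGo fuel a b cnt = -1 := by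
  induction fuel generalizing a cnt with
  | zero => rfl
  | succ fuel ih =>
    rw [solutionGo, if_neg (fun e => h (by rw [e]))]
    cases ha : a with
    | nil => rfl
    | cons c t =>
      rw [← ha, pyGet_neg_one a (by rw [ha]; simp)]
      simp only []
      rw [step_eq_pvRot a (by rw [ha]; simp)]
      exact ih (pvRot a) (cnt + 1) (by rw [pvRot_length]; exact h)

-- ===== VERDICT (by name: the statement is the Claim_ definition above) =====
theorem solution_spec : Claim_unchanged_solution := by
  intro A B _ hnD
  unfold solution solution_alt
  set a := A.toList with hA
  set b := B.toList with hB
  by_cases hlen : a.length = b.length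
  · by_cases ha : a = []
    · exact absurd ⟨ha, List.eq_nil_of_length_eq_zero (by rw [← hlen, ha]; rfl)⟩ hnD
    · have hbpos : 0 < b.length := by
        rw [← hlen]; exact List.length_pos_of_ne_nil ha
      rw [if_pos hlen, go_spec _ _ _ _ ha]
      by_cases hneg : PySem.Chars.find (b ++ b) a = -1
      · have hninf : ¬ a <:+: (b ++ b) := (PySem.Chars.find_eq_neg_one_iff _ _).mp hneg
        have hnone : (List.range a.length).find? (fun j => decide (pvRot^[j] a = b)) = none := by
          apply List.find?_eq_none.mpr
          intro j hj
          simp only [decide_eq_true_eq]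
          intro hrot
          apply hninf
          have hj' : j ≤ b.length := by
            have := List.mem_range.mp hj; omega
          have : a <+: (b ++ b).drop j :=
            (prefix_drop_iff a b hlen j hj').mpr ((iter_eq_iff j a b ha).mp hrot)
          exact this.isInfix.trans (List.drop_suffix j (b ++ b)).isInfix
        rw [hnone, hneg]
      · have hknn : 0 ≤ PySem.Chars.find (b ++ b) a := by
          have := PySem.Chars.neg_one_le_find (b ++ b) a
          omega
        set k := PySem.Chars.find (b ++ b) a with hk
        obtain ⟨hpre, hmin⟩ := PySem.Chars.find_spec hknn
        have hkle : k ≤ ((b ++ b).length : Int) := PySem.Chars.find_le_length _ _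
        have halen : a.length ≤ ((b ++ b).drop k.toNat).length := hpre.length_le
        rw [List.length_drop, List.length_append] at halen
        have hkleb : k.toNat ≤ b.length := by omega
        have hklt : k.toNat < b.length := by
          rcases Nat.lt_or_ge k.toNat b.length with h | h
          · exact h
          · exfalso
            have hkb : k.toNat = b.length := by omega
            rw [hkb, List.drop_left] at hpre
            have hab : a = b := hpre.eq_of_length hlen
            have : a <+: (b ++ b).drop 0 := by
              rw [List.drop_zero, hab]; exact List.prefix_append b b
            exact hmin 0 (by omega) this
        have hPm : pvRot^[k.toNat] a = b :=
          (iter_eq_iff k.toNat a b ha).mpr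
            ((prefix_drop_iff a b hlen k.toNat (by omega)).mp hpre)
        have hsome : (List.range a.length).find? (fun j => decide (pvRot^[j] a = b)) =
            some k.toNat := by
          apply find?_range_some _ _ _ (by omega)
          · simp [hPm]
          · intro j hj
            simp only [decide_eq_false_iff_not]
            intro hrot
            exact hmin j hj ((prefix_drop_iff a b hlen j (by omega)).mpr
              ((iter_eq_iff j a b ha).mp hrot))
        rw [hsome]
        simp [Int.toNat_of_nonneg hknn]
  · rw [if_neg hlen]
    exact go_ne_length _ _ _ _ hlen

theorem solution_changed : Claim_changed_solution := by
  unfold Claim_changed_solution; decide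

theorem solution_tight : Claim_exact_solution := by
  intro A B _ hD
  obtain ⟨hA, hB⟩ := hD
  unfold solution solution_alt
  rw [hA, hB]
  decide
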